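-- pv_equiv track=rewrite | github.com/pypi-data/pypi-mirror-364 | packages/gway/gway-0.4.53.tar.gz/gway-0.4.53/projects/help_db.py | _extract_todos
-- ===== SOURCE A (Python) =====
-- def _extract_todos(source: str):
--     todos = []
--     lines = source.splitlines()
--     current = []
--     for line in lines:
--         stripped = line.strip()
--         if "# TODO" in stripped:
--             if current:
--                 todos.append("\n".join(current))
--             current = [stripped]
--         elif current and (stripped.startswith("#") or not stripped):
--             current.append(stripped)
--         elif current:
--             todos.append("\n".join(current))
--             current = []
--     if current:
--         todos.append("\n".join(current))
--     return todos
-- ===== SOURCE B (Python) =====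
-- def _extract_todos(source: str):
--     stripped = [line.strip() for line in source.splitlines()]
--     n = len(stripped)
--     todos = []
--     i = 0
--     while i < n:
--         s = stripped[i]
--         if "# TODO" in s:
--             block = [s]
--             j = i + 1
--             while j < n and "# TODO" not in stripped[j] and (
--                 stripped[j].startswith("#") or not stripped[j]
--             ):
--                 block.append(stripped[j])
--                 j += 1
--             todos.append("\n".join(block))
--             i = j
--         else:
--             i += 1
--     return todos
-- ===== Notes on version B (the rewrite author's own statement) =====
-- stated objective: alternative
-- what changed: Replaces A's single pass with mutable current-block state (and an end-of-input flush) by a block-at-a-time scan: on each '# TODO' line an inner loop collects the continuation lines and emits the joined block immediately, so no accumulator state or final flush exists.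
import Mathlib
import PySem

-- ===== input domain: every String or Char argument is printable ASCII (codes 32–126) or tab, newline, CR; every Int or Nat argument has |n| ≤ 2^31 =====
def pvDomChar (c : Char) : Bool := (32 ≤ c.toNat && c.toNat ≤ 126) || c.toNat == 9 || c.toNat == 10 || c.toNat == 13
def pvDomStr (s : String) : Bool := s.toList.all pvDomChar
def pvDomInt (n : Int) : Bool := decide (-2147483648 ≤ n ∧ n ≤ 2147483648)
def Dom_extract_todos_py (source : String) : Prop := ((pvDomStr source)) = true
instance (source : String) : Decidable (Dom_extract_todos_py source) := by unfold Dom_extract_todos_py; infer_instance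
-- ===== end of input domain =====

-- B replaces A's single pass with mutable current-block state (and end-of-input flush) by a
-- block-at-a-time scan: each '# TODO' line triggers an inner collection of its continuation
-- lines, emitted immediately (objective: alternative decomposition, same O(n) cost).


-- ===== PORT A =====
-- '"# TODO" in stripped'
def pvHasTodo (s : String) : Bool := PySem.Str.isIn "# TODO" s
-- 'stripped.startswith("#") or not stripped'
def pvCmt (s : String) : Bool := PySem.Str.startswith s "#" || s == ""

-- one iteration of A's for-loop over (todos, current)
def pvStepA (st : List String × List String) (line : String) : List String × List String :=
  let (todos, current) := st
  let stripped := PySem.Str.strip line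
  if pvHasTodo stripped then
    ((if current.isEmpty then todos else todos ++ [PySem.Str.join "\n" current]), [stripped])
  else if !current.isEmpty && pvCmt stripped then
    (todos, current ++ [stripped])
  else if !current.isEmpty then
    (todos ++ [PySem.Str.join "\n" current], [])
  else (todos, current)

def extract_todos_py (source : String) : List String :=
  let st := (PySem.Str.splitlines source).foldl pvStepA ([], [])
  if st.2.isEmpty then st.1 else st.1 ++ [PySem.Str.join "\n" st.2]

-- ===== PORT B =====
-- the inner while-loop's condition: a continuation line of a block
def pvBCont (s : String) : Bool := !pvHasTodo s && pvCmt s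

-- B's outer loop over the stripped lines: on a '# TODO' line, the inner while collects the
-- continuation lines (takeWhile) and scanning resumes after them (dropWhile, = 'i = j')
def pvAltGo : List String → List String
  | [] => []
  | s :: rest =>
    if pvHasTodo s then
      PySem.Str.join "\n" (s :: rest.takeWhile pvBCont) :: pvAltGo (rest.dropWhile pvBCont)
    else pvAltGo rest
termination_by ls => ls.length
decreasing_by
  · simpa using Nat.lt_succ_of_le (List.length_dropWhile_le pvBCont rest)
  · simp

def extract_todos_py_alt (source : String) : List String :=
  pvAltGo ((PySem.Str.splitlines source).map PySem.Str.strip)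

-- ===== PRECONDITION & SPEC =====
def Spec_extract_todos_py (source : String) (out : List String) : Prop := out = extract_todos_py_alt source
instance (source : String) (out : List String) : Decidable (Spec_extract_todos_py source out) := by unfold Spec_extract_todos_py; infer_instance

-- ===== CLAIM (what is proved, stated in full; the proofs are below) =====
def Claim_equal_extract_todos_py : Prop := ∀ (source : String), Dom_extract_todos_py source → Spec_extract_todos_py source (extract_todos_py source)

-- ===== LEMMAS AND PROOFS =====
-- A's flush at end of loop
def pvFin (st : List String × List String) : List String :=
  if st.2.isEmpty then st.1 else st.1 ++ [PySem.Str.join "\n" st.2]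

-- loop invariant: A's remaining fold, flushed, equals the blocks already emitted plus either
-- B's scan of the rest (current empty) or the join of the open block with its continuation
-- lines followed by B's scan of what remains
theorem pv_key : ∀ (lines todos cur : List String),
    pvFin (lines.foldl pvStepA (todos, cur)) =
      if cur.isEmpty then todos ++ pvAltGo (lines.map PySem.Str.strip)
      else todos ++ [PySem.Str.join "\n" (cur ++ (lines.map PySem.Str.strip).takeWhile pvBCont)]
             ++ pvAltGo ((lines.map PySem.Str.strip).dropWhile pvBCont) := by
  intro lines
  induction lines with
  | nil =>
    intro todos cur
    by_cases h : cur.isEmpty <;> simp [pvFin, pvAltGo, h]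
  | cons l rest ih =>
    intro todos cur
    simp only [List.foldl_cons, List.map_cons]
    by_cases ht : pvHasTodo (PySem.Str.strip l)
    · have hc : pvBCont (PySem.Str.strip l) = false := by
        simp [pvBCont, ht]
      rw [show rest.foldl pvStepA (pvStepA (todos, cur) l)
            = rest.foldl pvStepA
                ((if cur.isEmpty then todos else todos ++ [PySem.Str.join "\n" cur]),
                 [PySem.Str.strip l]) by simp [pvStepA, ht]]
      rw [ih]
      by_cases h : cur.isEmpty <;>
        simp [h, pvAltGo, ht, hc]
    · by_cases hm : pvCmt (PySem.Str.strip l)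
      · have hc : pvBCont (PySem.Str.strip l) = true := by simp [pvBCont, ht, hm]
        by_cases h : cur.isEmpty
        · rw [show pvStepA (todos, cur) l = (todos, cur) by simp [pvStepA, ht, hm, h]]
          rw [ih]
          simp [h, pvAltGo, ht]
        · rw [show pvStepA (todos, cur) l = (todos, cur ++ [PySem.Str.strip l]) by
            simp [pvStepA, ht, hm, h]]
          rw [ih]
          simp [h, hc]
      · have hc : pvBCont (PySem.Str.strip l) = false := by simp [pvBCont, ht, hm]
        by_cases h : cur.isEmpty
        · rw [show pvStepA (todos, cur) l = (todos, cur) by simp [pvStepA, ht, hm, h]]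
          rw [ih]
          simp [h, pvAltGo, ht]
        · rw [show pvStepA (todos, cur) l
              = (todos ++ [PySem.Str.join "\n" cur], []) by simp [pvStepA, ht, hm, h]]
          rw [ih]
          simp [h, hc, pvAltGo, ht]

-- ===== VERDICT (by name: the statement is the Claim_ definition above) =====
theorem extract_todos_py_spec : Claim_equal_extract_todos_py := by
  intro source _
  unfold Spec_extract_todos_py extract_todos_py extract_todos_py_alt
  have := pv_key (PySem.Str.splitlines source) [] []
  simpa [pvFin] using this
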